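-- pv_equiv track=rewrite | github.com/developer-yashgupta/helthbridge-ai | ai-engine/multilingual_processor.py | translate_explanation
-- ===== SOURCE A (Python) =====
-- def translate_explanation(explanation: str, target_language: str) -> str:
--     """Translate explanation text"""
--     if target_language == 'hi':
--         # Basic explanation translations
--         translations = {
--             'high risk': 'उच्च जोखिम',
--             'medium risk': 'मध्यम जोखिम',
--             'low risk': 'कम जोखिम',
--             'symptoms': 'लक्षण',
--             'require immediate attention': 'तुरंत ध्यान देने की आवश्यकता है',
--             'should be monitored': 'निगरानी की जानी चाहिए'
--         }
--
--         translated = explanation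
--         for english, hindi in translations.items():
--             translated = translated.replace(english, hindi)
--
--         return translated
--
--     return explanation
-- ===== SOURCE B (Python) =====
-- import re
--
--
-- def translate_explanation(explanation: str, target_language: str) -> str:
--     """Translate explanation text"""
--     if target_language != 'hi':
--         return explanation
--
--     translations = {
--         'high risk': 'उच्च जोखिम',
--         'medium risk': 'मध्यम जोखिम',
--         'low risk': 'कम जोखिम',
--         'symptoms': 'लक्षण',
--         'require immediate attention': 'तुरंत ध्यान देने की आवश्यकता है',
--         'should be monitored': 'निगरानी की जानी चाहिए'
--     }
--     pattern = re.compile('|'.join(re.escape(k) for k in translations))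
--     return pattern.sub(lambda m: translations[m.group(0)], explanation)
-- ===== Notes on version B (the rewrite author's own statement) =====
-- stated objective: alternative
-- what changed: A makes six sequential full-string .replace passes (one per dictionary entry); B compiles one regex alternation over the escaped keys and translates everything in a single left-to-right pass with a dict lookup per match.
import Mathlib
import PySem

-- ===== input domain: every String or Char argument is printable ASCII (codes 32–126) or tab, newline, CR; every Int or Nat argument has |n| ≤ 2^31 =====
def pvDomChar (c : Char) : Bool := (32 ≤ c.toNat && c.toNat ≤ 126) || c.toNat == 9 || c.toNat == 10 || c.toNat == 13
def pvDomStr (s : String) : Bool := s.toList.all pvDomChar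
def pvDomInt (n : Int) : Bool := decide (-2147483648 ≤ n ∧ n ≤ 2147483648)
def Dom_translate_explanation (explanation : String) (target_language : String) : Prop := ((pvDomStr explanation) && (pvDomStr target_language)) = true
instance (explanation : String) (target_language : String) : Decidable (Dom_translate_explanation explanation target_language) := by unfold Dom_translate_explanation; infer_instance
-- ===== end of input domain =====

-- B replaces A's six sequential full-string `.replace` passes by one left-to-right scan
-- (a compiled regex alternation in Python); same return value, different traversal (objective: alternative).

-- ===== PORT A =====
-- the dict literal of A, in insertion order
def aTranslations : List (String × String) :=
  [("high risk", "उच्च जोखिम"),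
   ("medium risk", "मध्यम जोखिम"),
   ("low risk", "कम जोखिम"),
   ("symptoms", "लक्षण"),
   ("require immediate attention", "तुरंत ध्यान देने की आवश्यकता है"),
   ("should be monitored", "निगरानी की जानी चाहिए")]

def translate_explanation (explanation : String) (target_language : String) : String :=
  if target_language = "hi" then
    aTranslations.foldl (fun translated p => PySem.Str.replace translated p.1 p.2) explanation
  else explanation

-- ===== PORT B =====
-- the same table, as char lists (Source B builds the dict and a regex alternation over its keys)
def bTable : List (List Char × List Char) :=
  [("high risk".toList, "उच्च जोखिम".toList),
   ("medium risk".toList, "मध्यम जोखिम".toList),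
   ("low risk".toList, "कम जोखिम".toList),
   ("symptoms".toList, "लक्षण".toList),
   ("require immediate attention".toList, "तुरंत ध्यान देने की आवश्यकता है".toList),
   ("should be monitored".toList, "निगरानी की जानी चाहिए".toList)]

-- try the alternatives of the regex in order at the current position
def bMatch : List (List Char × List Char) → List Char → Option (List Char × List Char)
  | [], _ => none
  | (k, h) :: rest, s => if k.isPrefixOf s then some (k, h) else bMatch rest s

-- one left-to-right pass: emit the translation and skip the key on a match, else copy one char
def bScan : List Char → List Char
  | [] => []
  | c :: t =>
    match bMatch bTable (c :: t) with
    | some (k, h) => h ++ bScan (t.drop (k.length - 1))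
    | none => c :: bScan t
termination_by s => s.length
decreasing_by
  all_goals simp

def translate_explanation_alt (explanation : String) (target_language : String) : String :=
  if target_language ≠ "hi" then explanation
  else String.ofList (bScan explanation.toList)

-- ===== PRECONDITION & SPEC =====
def Spec_translate_explanation (explanation : String) (target_language : String) (out : String) : Prop := out = translate_explanation_alt explanation target_language
instance (explanation : String) (target_language : String) (out : String) : Decidable (Spec_translate_explanation explanation target_language out) := by unfold Spec_translate_explanation; infer_instance

-- ===== CLAIM (what is proved, stated in full; the proofs are below) =====
def Claim_equal_translate_explanation : Prop := ∀ (explanation : String) (target_language : String), Dom_translate_explanation explanation target_language → Spec_translate_explanation explanation target_language (translate_explanation explanation target_language)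

-- ===== LEMMAS AND PROOFS =====

-- proof-side structural version of Python's str.replace (nonempty needle, split as c₀ :: o)
def repc (c₀ : Char) (o n : List Char) : List Char → List Char
  | [] => []
  | c :: t =>
    if (c₀ :: o).isPrefixOf (c :: t) then n ++ repc c₀ o n (t.drop o.length)
    else c :: repc c₀ o n t
termination_by s => s.length
decreasing_by
  all_goals simp

lemma go_eq (c₀ : Char) (o n : List Char) :
    ∀ (fuel : Nat) (l acc : List Char), l.length ≤ fuel →
      PySem.Chars.replace.go (c₀ :: o) n fuel l acc = acc.reverse ++ repc c₀ o n l := by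
  intro fuel
  induction fuel with
  | zero =>
    intro l acc h
    have : l = [] := by cases l <;> simp_all
    subst this
    simp [PySem.Chars.replace.go, repc]
  | succ m ih =>
    intro l acc h
    cases l with
    | nil => simp [PySem.Chars.replace.go, repc]
    | cons c t =>
      rw [PySem.Chars.replace.go]
      by_cases hp : (c₀ :: o).isPrefixOf (c :: t)
      · rw [if_pos hp]
        rw [ih _ _ (by simp at h ⊢; have := List.length_drop (l := t) (i := o.length); omega)]
        rw [repc, if_pos hp]
        simp
      · rw [if_neg hp, ih _ _ (by simp at h ⊢; omega), repc, if_neg hp]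
        simp

lemma replace_eq_repc (c₀ : Char) (o n s : List Char) :
    PySem.Chars.replace s (c₀ :: o) n = repc c₀ o n s := by
  rw [PySem.Chars.replace]
  simp [go_eq c₀ o n s.length s [] (le_refl _)]

-- repc step lemmas
lemma repc_nil (c₀ : Char) (o n : List Char) : repc c₀ o n [] = [] := by rw [repc]

lemma repc_cons_neg (c₀ : Char) (o n : List Char) (c : Char) (t : List Char)
    (h : ¬ (c₀ :: o) <+: (c :: t)) : repc c₀ o n (c :: t) = c :: repc c₀ o n t := by
  rw [repc, if_neg (by simp [List.isPrefixOf_iff_prefix, h])]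

lemma repc_cons_pos (c₀ : Char) (o n r : List Char) :
    repc c₀ o n ((c₀ :: o) ++ r) = n ++ repc c₀ o n r := by
  rw [List.cons_append, repc,
    if_pos (List.isPrefixOf_iff_prefix.mpr (by rw [← List.cons_append]; exact List.prefix_append (c₀ :: o) r)),
    List.drop_left]

-- u and the needle k never overlap: no nonempty suffix of u is prefix-comparable with k
abbrev Indep (u k : List Char) : Prop :=
  (u.tails.all (fun v => v.isEmpty || (!(v.isPrefixOf k) && !(k.isPrefixOf v)))) = true

lemma indep_spec {u k : List Char} (hi : Indep u k) :
    ∀ v ∈ u.tails, v ≠ [] → ¬ v <+: k ∧ ¬ k <+: v := by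
  intro v hv hne
  have h := (List.all_eq_true.mp hi) v hv
  simp [List.isEmpty_iff, hne] at h
  obtain ⟨h1, h2⟩ := h
  exact ⟨fun hp => by rw [List.isPrefixOf_iff_prefix.mpr hp] at h1; exact absurd h1 (by decide),
         fun hp => by rw [List.isPrefixOf_iff_prefix.mpr hp] at h2; exact absurd h2 (by decide)⟩

lemma not_prefix_of_indep {u k : List Char} (hu : u ≠ []) (hi : Indep u k) (x : List Char) :
    ¬ k <+: (u ++ x) := by
  intro h
  have huk := indep_spec hi u (by simp) hu
  rcases Nat.le_total k.length u.length with hle | hle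
  · exact huk.2 (List.prefix_of_prefix_length_le h (List.prefix_append u x) hle)
  · exact huk.1 (List.prefix_of_prefix_length_le (List.prefix_append u x) h hle)

lemma indep_tail {c : Char} {u k : List Char} (hi : Indep (c :: u) k) : Indep u k := by
  simp only [Indep, List.tails_cons, List.all_cons, Bool.and_eq_true] at hi
  exact hi.2

lemma repc_append_of_indep (c₀ : Char) (o n : List Char) {u : List Char} (x : List Char)
    (hi : Indep u (c₀ :: o)) : repc c₀ o n (u ++ x) = u ++ repc c₀ o n x := by
  induction u with
  | nil => simp
  | cons c u' ih =>
    rw [List.cons_append,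
      repc_cons_neg c₀ o n c (u' ++ x) (not_prefix_of_indep (by simp) hi x),
      ih (indep_tail hi)]
    rfl

-- an all-ASCII-side list that is a prefix of a repc result (whose replacement starts with a
-- char it never contains) was already a prefix of the input
lemma prefix_repc (c₀ : Char) (o : List Char) (nh : Char) (n' : List Char) :
    ∀ (m : Nat) (x u : List Char), x.length ≤ m → (∀ ch ∈ u, ch ≠ nh) →
      u <+: repc c₀ o (nh :: n') x → u <+: x := by
  intro m
  induction m with
  | zero =>
    intro x u hx _ h
    have : x = [] := by cases x <;> simp_all
    subst this; rwa [repc_nil] at h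
  | succ m ih =>
    intro x u hx hd h
    cases x with
    | nil => rwa [repc_nil] at h
    | cons c t =>
      by_cases hp : (c₀ :: o) <+: (c :: t)
      · obtain ⟨r, hr⟩ := hp
        rw [← hr, repc_cons_pos] at h
        cases u with
        | nil => simp
        | cons d u' =>
          exfalso
          rw [List.cons_append] at h
          obtain ⟨hdn, -⟩ := List.cons_prefix_cons.mp h
          exact hd d (by simp) hdn
      · rw [repc_cons_neg c₀ o (nh :: n') c t hp] at h
        cases u with
        | nil => simp
        | cons d u' =>
          obtain ⟨hdc, hu'⟩ := List.cons_prefix_cons.mp h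
          subst hdc
          have : t.length ≤ m := by simp at hx; omega
          exact List.cons_prefix_cons.mpr ⟨rfl, ih t u' this (fun ch hch => hd ch (by simp [hch])) hu'⟩

-- key and translation constants, head char :: tail (proof-side names for the table entries)
def K1t : List Char := "igh risk".toList
def K1 : List Char := 'h' :: K1t
def K2t : List Char := "edium risk".toList
def K2 : List Char := 'm' :: K2t
def K3t : List Char := "ow risk".toList
def K3 : List Char := 'l' :: K3t
def K4t : List Char := "ymptoms".toList
def K4 : List Char := 's' :: K4t
def K5t : List Char := "equire immediate attention".toList
def K5 : List Char := 'r' :: K5t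
def K6t : List Char := "hould be monitored".toList
def K6 : List Char := 's' :: K6t
def H1t : List Char := "च्च जोखिम".toList
def H1 : List Char := 'उ' :: H1t
def H2t : List Char := "ध्यम जोखिम".toList
def H2 : List Char := 'म' :: H2t
def H3t : List Char := "म जोखिम".toList
def H3 : List Char := 'क' :: H3t
def H4t : List Char := "क्षण".toList
def H4 : List Char := 'ल' :: H4t
def H5t : List Char := "ुरंत ध्यान देने की आवश्यकता है".toList
def H5 : List Char := 'त' :: H5t
def H6t : List Char := "िगरानी की जानी चाहिए".toList
def H6 : List Char := 'न' :: H6t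

lemma bTableEq : bTable = [(K1, H1), (K2, H2), (K3, H3), (K4, H4), (K5, H5), (K6, H6)] := by decide

-- each Python replace pass, as a repc instance
lemma rep1 (s : List Char) :
    PySem.Chars.replace s ("high risk".toList) ("उच्च जोखिम".toList) = repc 'h' K1t H1 s := by
  rw [show ("high risk" : String).toList = 'h' :: K1t from by decide,
      show ("उच्च जोखिम" : String).toList = H1 from by decide, replace_eq_repc]
lemma rep2 (s : List Char) :
    PySem.Chars.replace s ("medium risk".toList) ("मध्यम जोखिम".toList) = repc 'm' K2t H2 s := by
  rw [show ("medium risk" : String).toList = 'm' :: K2t from by decide,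
      show ("मध्यम जोखिम" : String).toList = H2 from by decide, replace_eq_repc]
lemma rep3 (s : List Char) :
    PySem.Chars.replace s ("low risk".toList) ("कम जोखिम".toList) = repc 'l' K3t H3 s := by
  rw [show ("low risk" : String).toList = 'l' :: K3t from by decide,
      show ("कम जोखिम" : String).toList = H3 from by decide, replace_eq_repc]
lemma rep4 (s : List Char) :
    PySem.Chars.replace s ("symptoms".toList) ("लक्षण".toList) = repc 's' K4t H4 s := by
  rw [show ("symptoms" : String).toList = 's' :: K4t from by decide,
      show ("लक्षण" : String).toList = H4 from by decide, replace_eq_repc]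
lemma rep5 (s : List Char) :
    PySem.Chars.replace s ("require immediate attention".toList) ("तुरंत ध्यान देने की आवश्यकता है".toList) = repc 'r' K5t H5 s := by
  rw [show ("require immediate attention" : String).toList = 'r' :: K5t from by decide,
      show ("तुरंत ध्यान देने की आवश्यकता है" : String).toList = H5 from by decide, replace_eq_repc]
lemma rep6 (s : List Char) :
    PySem.Chars.replace s ("should be monitored".toList) ("निगरानी की जानी चाहिए".toList) = repc 's' K6t H6 s := by
  rw [show ("should be monitored" : String).toList = 's' :: K6t from by decide,
      show ("निगरानी की जानी चाहिए" : String).toList = H6 from by decide, replace_eq_repc]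

-- A's six passes composed (proof-side normal form of port A's fold)
def seqApply (s : List Char) : List Char :=
  repc 's' K6t H6 (repc 'r' K5t H5 (repc 's' K4t H4 (repc 'l' K3t H3 (repc 'm' K2t H2 (repc 'h' K1t H1 (s))))))

lemma bScan_nil : bScan [] = [] := by rw [bScan]

-- bScan on a string starting with table key i emits translation i and moves on
lemma bScan_K1 (r : List Char) : bScan (K1 ++ r) = H1 ++ bScan r := by
  have hpos : (K1 : List Char) <+: 'h' :: (K1t ++ r) := by
    simp only [K1]; exact List.cons_prefix_cons.mpr ⟨rfl, List.prefix_append _ _⟩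
  rw [show (K1 : List Char) = 'h' :: K1t from rfl, List.cons_append, bScan, bTableEq]
  simp only [bMatch, List.isPrefixOf_iff_prefix]
  rw [if_pos hpos]
  show H1 ++ bScan (List.drop ((K1 : List Char).length - 1) (K1t ++ r)) = H1 ++ bScan r
  rw [show List.drop ((K1 : List Char).length - 1) (K1t ++ r) = r from by
    rw [show (K1 : List Char).length - 1 = K1t.length from by decide, List.drop_left]]
lemma bScan_K2 (r : List Char) : bScan (K2 ++ r) = H2 ++ bScan r := by
  have n1 : ¬ (K1 : List Char) <+: 'm' :: (K2t ++ r) := by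
    have := not_prefix_of_indep (u := K2) (by decide) (by decide : Indep K2 K1) r
    simpa only [K2, List.cons_append] using this
  have hpos : (K2 : List Char) <+: 'm' :: (K2t ++ r) := by
    simp only [K2]; exact List.cons_prefix_cons.mpr ⟨rfl, List.prefix_append _ _⟩
  rw [show (K2 : List Char) = 'm' :: K2t from rfl, List.cons_append, bScan, bTableEq]
  simp only [bMatch, List.isPrefixOf_iff_prefix]
  rw [if_neg n1, if_pos hpos]
  show H2 ++ bScan (List.drop ((K2 : List Char).length - 1) (K2t ++ r)) = H2 ++ bScan r
  rw [show List.drop ((K2 : List Char).length - 1) (K2t ++ r) = r from by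
    rw [show (K2 : List Char).length - 1 = K2t.length from by decide, List.drop_left]]
lemma bScan_K3 (r : List Char) : bScan (K3 ++ r) = H3 ++ bScan r := by
  have n1 : ¬ (K1 : List Char) <+: 'l' :: (K3t ++ r) := by
    have := not_prefix_of_indep (u := K3) (by decide) (by decide : Indep K3 K1) r
    simpa only [K3, List.cons_append] using this
  have n2 : ¬ (K2 : List Char) <+: 'l' :: (K3t ++ r) := by
    have := not_prefix_of_indep (u := K3) (by decide) (by decide : Indep K3 K2) r
    simpa only [K3, List.cons_append] using this
  have hpos : (K3 : List Char) <+: 'l' :: (K3t ++ r) := by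
    simp only [K3]; exact List.cons_prefix_cons.mpr ⟨rfl, List.prefix_append _ _⟩
  rw [show (K3 : List Char) = 'l' :: K3t from rfl, List.cons_append, bScan, bTableEq]
  simp only [bMatch, List.isPrefixOf_iff_prefix]
  rw [if_neg n1, if_neg n2, if_pos hpos]
  show H3 ++ bScan (List.drop ((K3 : List Char).length - 1) (K3t ++ r)) = H3 ++ bScan r
  rw [show List.drop ((K3 : List Char).length - 1) (K3t ++ r) = r from by
    rw [show (K3 : List Char).length - 1 = K3t.length from by decide, List.drop_left]]
lemma bScan_K4 (r : List Char) : bScan (K4 ++ r) = H4 ++ bScan r := by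
  have n1 : ¬ (K1 : List Char) <+: 's' :: (K4t ++ r) := by
    have := not_prefix_of_indep (u := K4) (by decide) (by decide : Indep K4 K1) r
    simpa only [K4, List.cons_append] using this
  have n2 : ¬ (K2 : List Char) <+: 's' :: (K4t ++ r) := by
    have := not_prefix_of_indep (u := K4) (by decide) (by decide : Indep K4 K2) r
    simpa only [K4, List.cons_append] using this
  have n3 : ¬ (K3 : List Char) <+: 's' :: (K4t ++ r) := by
    have := not_prefix_of_indep (u := K4) (by decide) (by decide : Indep K4 K3) r
    simpa only [K4, List.cons_append] using this
  have hpos : (K4 : List Char) <+: 's' :: (K4t ++ r) := by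
    simp only [K4]; exact List.cons_prefix_cons.mpr ⟨rfl, List.prefix_append _ _⟩
  rw [show (K4 : List Char) = 's' :: K4t from rfl, List.cons_append, bScan, bTableEq]
  simp only [bMatch, List.isPrefixOf_iff_prefix]
  rw [if_neg n1, if_neg n2, if_neg n3, if_pos hpos]
  show H4 ++ bScan (List.drop ((K4 : List Char).length - 1) (K4t ++ r)) = H4 ++ bScan r
  rw [show List.drop ((K4 : List Char).length - 1) (K4t ++ r) = r from by
    rw [show (K4 : List Char).length - 1 = K4t.length from by decide, List.drop_left]]
lemma bScan_K5 (r : List Char) : bScan (K5 ++ r) = H5 ++ bScan r := by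
  have n1 : ¬ (K1 : List Char) <+: 'r' :: (K5t ++ r) := by
    have := not_prefix_of_indep (u := K5) (by decide) (by decide : Indep K5 K1) r
    simpa only [K5, List.cons_append] using this
  have n2 : ¬ (K2 : List Char) <+: 'r' :: (K5t ++ r) := by
    have := not_prefix_of_indep (u := K5) (by decide) (by decide : Indep K5 K2) r
    simpa only [K5, List.cons_append] using this
  have n3 : ¬ (K3 : List Char) <+: 'r' :: (K5t ++ r) := by
    have := not_prefix_of_indep (u := K5) (by decide) (by decide : Indep K5 K3) r
    simpa only [K5, List.cons_append] using this
  have n4 : ¬ (K4 : List Char) <+: 'r' :: (K5t ++ r) := by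
    have := not_prefix_of_indep (u := K5) (by decide) (by decide : Indep K5 K4) r
    simpa only [K5, List.cons_append] using this
  have hpos : (K5 : List Char) <+: 'r' :: (K5t ++ r) := by
    simp only [K5]; exact List.cons_prefix_cons.mpr ⟨rfl, List.prefix_append _ _⟩
  rw [show (K5 : List Char) = 'r' :: K5t from rfl, List.cons_append, bScan, bTableEq]
  simp only [bMatch, List.isPrefixOf_iff_prefix]
  rw [if_neg n1, if_neg n2, if_neg n3, if_neg n4, if_pos hpos]
  show H5 ++ bScan (List.drop ((K5 : List Char).length - 1) (K5t ++ r)) = H5 ++ bScan r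
  rw [show List.drop ((K5 : List Char).length - 1) (K5t ++ r) = r from by
    rw [show (K5 : List Char).length - 1 = K5t.length from by decide, List.drop_left]]
lemma bScan_K6 (r : List Char) : bScan (K6 ++ r) = H6 ++ bScan r := by
  have n1 : ¬ (K1 : List Char) <+: 's' :: (K6t ++ r) := by
    have := not_prefix_of_indep (u := K6) (by decide) (by decide : Indep K6 K1) r
    simpa only [K6, List.cons_append] using this
  have n2 : ¬ (K2 : List Char) <+: 's' :: (K6t ++ r) := by
    have := not_prefix_of_indep (u := K6) (by decide) (by decide : Indep K6 K2) r
    simpa only [K6, List.cons_append] using this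
  have n3 : ¬ (K3 : List Char) <+: 's' :: (K6t ++ r) := by
    have := not_prefix_of_indep (u := K6) (by decide) (by decide : Indep K6 K3) r
    simpa only [K6, List.cons_append] using this
  have n4 : ¬ (K4 : List Char) <+: 's' :: (K6t ++ r) := by
    have := not_prefix_of_indep (u := K6) (by decide) (by decide : Indep K6 K4) r
    simpa only [K6, List.cons_append] using this
  have n5 : ¬ (K5 : List Char) <+: 's' :: (K6t ++ r) := by
    have := not_prefix_of_indep (u := K6) (by decide) (by decide : Indep K6 K5) r
    simpa only [K6, List.cons_append] using this
  have hpos : (K6 : List Char) <+: 's' :: (K6t ++ r) := by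
    simp only [K6]; exact List.cons_prefix_cons.mpr ⟨rfl, List.prefix_append _ _⟩
  rw [show (K6 : List Char) = 's' :: K6t from rfl, List.cons_append, bScan, bTableEq]
  simp only [bMatch, List.isPrefixOf_iff_prefix]
  rw [if_neg n1, if_neg n2, if_neg n3, if_neg n4, if_neg n5, if_pos hpos]
  show H6 ++ bScan (List.drop ((K6 : List Char).length - 1) (K6t ++ r)) = H6 ++ bScan r
  rw [show List.drop ((K6 : List Char).length - 1) (K6t ++ r) = r from by
    rw [show (K6 : List Char).length - 1 = K6t.length from by decide, List.drop_left]]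

lemma ball_ne_of_all {u : List Char} {d : Char} (h : u.all (fun ch => ch != d) = true) :
    ∀ ch ∈ u, ch ≠ d := by simpa [List.all_eq_true] using h

-- the heart of the matter: the six sequential passes equal the single scan
lemma seq_eq_scan : ∀ (m : Nat) (s : List Char), s.length ≤ m → seqApply s = bScan s := by
  intro m
  induction m with
  | zero =>
    intro s hs
    have hs0 : s = [] := by cases s <;> simp_all
    subst hs0
    simp only [seqApply, repc_nil, bScan_nil]
  | succ m ih =>
    intro s hs
    by_cases p1 : (K1 : List Char) <+: s
    · obtain ⟨r, rfl⟩ := p1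
      have hr : r.length ≤ m := by
        have h9 : (K1 : List Char).length = 9 := by decide
        simp only [List.length_append, h9] at hs; omega
      have hB := bScan_K1 r
      have hI := ih r hr
      simp only [seqApply] at hI ⊢
      rw [hB]
      simp only [K1]
      rw [repc_cons_pos,
          repc_append_of_indep 'm' K2t H2 _ (by decide : Indep H1 ('m' :: K2t)),
          repc_append_of_indep 'l' K3t H3 _ (by decide : Indep H1 ('l' :: K3t)),
          repc_append_of_indep 's' K4t H4 _ (by decide : Indep H1 ('s' :: K4t)),
          repc_append_of_indep 'r' K5t H5 _ (by decide : Indep H1 ('r' :: K5t)),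
          repc_append_of_indep 's' K6t H6 _ (by decide : Indep H1 ('s' :: K6t)), hI]
    by_cases p2 : (K2 : List Char) <+: s
    · obtain ⟨r, rfl⟩ := p2
      have hr : r.length ≤ m := by
        have h9 : (K2 : List Char).length = 11 := by decide
        simp only [List.length_append, h9] at hs; omega
      have hB := bScan_K2 r
      have hI := ih r hr
      simp only [seqApply] at hI ⊢
      rw [hB]
      simp only [K2]
      rw [repc_append_of_indep 'h' K1t H1 _ (by decide : Indep ('m' :: K2t) ('h' :: K1t)),
          repc_cons_pos,
          repc_append_of_indep 'l' K3t H3 _ (by decide : Indep H2 ('l' :: K3t)),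
          repc_append_of_indep 's' K4t H4 _ (by decide : Indep H2 ('s' :: K4t)),
          repc_append_of_indep 'r' K5t H5 _ (by decide : Indep H2 ('r' :: K5t)),
          repc_append_of_indep 's' K6t H6 _ (by decide : Indep H2 ('s' :: K6t)), hI]
    by_cases p3 : (K3 : List Char) <+: s
    · obtain ⟨r, rfl⟩ := p3
      have hr : r.length ≤ m := by
        have h9 : (K3 : List Char).length = 8 := by decide
        simp only [List.length_append, h9] at hs; omega
      have hB := bScan_K3 r
      have hI := ih r hr
      simp only [seqApply] at hI ⊢
      rw [hB]
      simp only [K3]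
      rw [repc_append_of_indep 'h' K1t H1 _ (by decide : Indep ('l' :: K3t) ('h' :: K1t)),
          repc_append_of_indep 'm' K2t H2 _ (by decide : Indep ('l' :: K3t) ('m' :: K2t)),
          repc_cons_pos,
          repc_append_of_indep 's' K4t H4 _ (by decide : Indep H3 ('s' :: K4t)),
          repc_append_of_indep 'r' K5t H5 _ (by decide : Indep H3 ('r' :: K5t)),
          repc_append_of_indep 's' K6t H6 _ (by decide : Indep H3 ('s' :: K6t)), hI]
    by_cases p4 : (K4 : List Char) <+: s
    · obtain ⟨r, rfl⟩ := p4
      have hr : r.length ≤ m := by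
        have h9 : (K4 : List Char).length = 8 := by decide
        simp only [List.length_append, h9] at hs; omega
      have hB := bScan_K4 r
      have hI := ih r hr
      simp only [seqApply] at hI ⊢
      rw [hB]
      simp only [K4]
      rw [repc_append_of_indep 'h' K1t H1 _ (by decide : Indep ('s' :: K4t) ('h' :: K1t)),
          repc_append_of_indep 'm' K2t H2 _ (by decide : Indep ('s' :: K4t) ('m' :: K2t)),
          repc_append_of_indep 'l' K3t H3 _ (by decide : Indep ('s' :: K4t) ('l' :: K3t)),
          repc_cons_pos,
          repc_append_of_indep 'r' K5t H5 _ (by decide : Indep H4 ('r' :: K5t)),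
          repc_append_of_indep 's' K6t H6 _ (by decide : Indep H4 ('s' :: K6t)), hI]
    by_cases p5 : (K5 : List Char) <+: s
    · obtain ⟨r, rfl⟩ := p5
      have hr : r.length ≤ m := by
        have h9 : (K5 : List Char).length = 27 := by decide
        simp only [List.length_append, h9] at hs; omega
      have hB := bScan_K5 r
      have hI := ih r hr
      simp only [seqApply] at hI ⊢
      rw [hB]
      simp only [K5]
      rw [repc_append_of_indep 'h' K1t H1 _ (by decide : Indep ('r' :: K5t) ('h' :: K1t)),
          repc_append_of_indep 'm' K2t H2 _ (by decide : Indep ('r' :: K5t) ('m' :: K2t)),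
          repc_append_of_indep 'l' K3t H3 _ (by decide : Indep ('r' :: K5t) ('l' :: K3t)),
          repc_append_of_indep 's' K4t H4 _ (by decide : Indep ('r' :: K5t) ('s' :: K4t)),
          repc_cons_pos,
          repc_append_of_indep 's' K6t H6 _ (by decide : Indep H5 ('s' :: K6t)), hI]
    by_cases p6 : (K6 : List Char) <+: s
    · obtain ⟨r, rfl⟩ := p6
      have hr : r.length ≤ m := by
        have h9 : (K6 : List Char).length = 19 := by decide
        simp only [List.length_append, h9] at hs; omega
      have hB := bScan_K6 r
      have hI := ih r hr
      simp only [seqApply] at hI ⊢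
      rw [hB]
      simp only [K6]
      rw [repc_append_of_indep 'h' K1t H1 _ (by decide : Indep ('s' :: K6t) ('h' :: K1t)),
          repc_append_of_indep 'm' K2t H2 _ (by decide : Indep ('s' :: K6t) ('m' :: K2t)),
          repc_append_of_indep 'l' K3t H3 _ (by decide : Indep ('s' :: K6t) ('l' :: K3t)),
          repc_append_of_indep 's' K4t H4 _ (by decide : Indep ('s' :: K6t) ('s' :: K4t)),
          repc_append_of_indep 'r' K5t H5 _ (by decide : Indep ('s' :: K6t) ('r' :: K5t)),
          repc_cons_pos, hI]
    -- no key matches at the front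
    cases s with
    | nil => simp only [seqApply, repc_nil, bScan_nil]
    | cons c t =>
      have ht : t.length ≤ m := by simp at hs; omega
      have hI := ih t ht
      simp only [seqApply] at hI ⊢
      have q1 : ¬ ('h' :: K1t) <+: (c :: t) := by simpa only [K1] using p1
      have q2 : ¬ ('m' :: K2t) <+: c :: repc 'h' K1t H1 (t) := by
        intro hp
        rcases List.cons_prefix_cons.mp hp with ⟨hc, h0⟩
        subst hc
        have h1 : K2t <+: t :=
          prefix_repc 'h' K1t 'उ' H1t (t).length (t) K2t le_rfl (ball_ne_of_all (by decide)) (by simpa only [H1] using h0)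
        exact p2 (by simp only [K2]; exact List.cons_prefix_cons.mpr ⟨rfl, h1⟩)
      have q3 : ¬ ('l' :: K3t) <+: c :: repc 'm' K2t H2 (repc 'h' K1t H1 (t)) := by
        intro hp
        rcases List.cons_prefix_cons.mp hp with ⟨hc, h0⟩
        subst hc
        have h1 : K3t <+: repc 'h' K1t H1 (t) :=
          prefix_repc 'm' K2t 'म' H2t (repc 'h' K1t H1 (t)).length (repc 'h' K1t H1 (t)) K3t le_rfl (ball_ne_of_all (by decide)) (by simpa only [H2] using h0)
        have h2 : K3t <+: t :=
          prefix_repc 'h' K1t 'उ' H1t (t).length (t) K3t le_rfl (ball_ne_of_all (by decide)) (by simpa only [H1] using h1)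
        exact p3 (by simp only [K3]; exact List.cons_prefix_cons.mpr ⟨rfl, h2⟩)
      have q4 : ¬ ('s' :: K4t) <+: c :: repc 'l' K3t H3 (repc 'm' K2t H2 (repc 'h' K1t H1 (t))) := by
        intro hp
        rcases List.cons_prefix_cons.mp hp with ⟨hc, h0⟩
        subst hc
        have h1 : K4t <+: repc 'm' K2t H2 (repc 'h' K1t H1 (t)) :=
          prefix_repc 'l' K3t 'क' H3t (repc 'm' K2t H2 (repc 'h' K1t H1 (t))).length (repc 'm' K2t H2 (repc 'h' K1t H1 (t))) K4t le_rfl (ball_ne_of_all (by decide)) (by simpa only [H3] using h0)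
        have h2 : K4t <+: repc 'h' K1t H1 (t) :=
          prefix_repc 'm' K2t 'म' H2t (repc 'h' K1t H1 (t)).length (repc 'h' K1t H1 (t)) K4t le_rfl (ball_ne_of_all (by decide)) (by simpa only [H2] using h1)
        have h3 : K4t <+: t :=
          prefix_repc 'h' K1t 'उ' H1t (t).length (t) K4t le_rfl (ball_ne_of_all (by decide)) (by simpa only [H1] using h2)
        exact p4 (by simp only [K4]; exact List.cons_prefix_cons.mpr ⟨rfl, h3⟩)
      have q5 : ¬ ('r' :: K5t) <+: c :: repc 's' K4t H4 (repc 'l' K3t H3 (repc 'm' K2t H2 (repc 'h' K1t H1 (t)))) := by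
        intro hp
        rcases List.cons_prefix_cons.mp hp with ⟨hc, h0⟩
        subst hc
        have h1 : K5t <+: repc 'l' K3t H3 (repc 'm' K2t H2 (repc 'h' K1t H1 (t))) :=
          prefix_repc 's' K4t 'ल' H4t (repc 'l' K3t H3 (repc 'm' K2t H2 (repc 'h' K1t H1 (t)))).length (repc 'l' K3t H3 (repc 'm' K2t H2 (repc 'h' K1t H1 (t)))) K5t le_rfl (ball_ne_of_all (by decide)) (by simpa only [H4] using h0)
        have h2 : K5t <+: repc 'm' K2t H2 (repc 'h' K1t H1 (t)) :=
          prefix_repc 'l' K3t 'क' H3t (repc 'm' K2t H2 (repc 'h' K1t H1 (t))).length (repc 'm' K2t H2 (repc 'h' K1t H1 (t))) K5t le_rfl (ball_ne_of_all (by decide)) (by simpa only [H3] using h1)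
        have h3 : K5t <+: repc 'h' K1t H1 (t) :=
          prefix_repc 'm' K2t 'म' H2t (repc 'h' K1t H1 (t)).length (repc 'h' K1t H1 (t)) K5t le_rfl (ball_ne_of_all (by decide)) (by simpa only [H2] using h2)
        have h4 : K5t <+: t :=
          prefix_repc 'h' K1t 'उ' H1t (t).length (t) K5t le_rfl (ball_ne_of_all (by decide)) (by simpa only [H1] using h3)
        exact p5 (by simp only [K5]; exact List.cons_prefix_cons.mpr ⟨rfl, h4⟩)
      have q6 : ¬ ('s' :: K6t) <+: c :: repc 'r' K5t H5 (repc 's' K4t H4 (repc 'l' K3t H3 (repc 'm' K2t H2 (repc 'h' K1t H1 (t))))) := by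
        intro hp
        rcases List.cons_prefix_cons.mp hp with ⟨hc, h0⟩
        subst hc
        have h1 : K6t <+: repc 's' K4t H4 (repc 'l' K3t H3 (repc 'm' K2t H2 (repc 'h' K1t H1 (t)))) :=
          prefix_repc 'r' K5t 'त' H5t (repc 's' K4t H4 (repc 'l' K3t H3 (repc 'm' K2t H2 (repc 'h' K1t H1 (t))))).length (repc 's' K4t H4 (repc 'l' K3t H3 (repc 'm' K2t H2 (repc 'h' K1t H1 (t))))) K6t le_rfl (ball_ne_of_all (by decide)) (by simpa only [H5] using h0)
        have h2 : K6t <+: repc 'l' K3t H3 (repc 'm' K2t H2 (repc 'h' K1t H1 (t))) :=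
          prefix_repc 's' K4t 'ल' H4t (repc 'l' K3t H3 (repc 'm' K2t H2 (repc 'h' K1t H1 (t)))).length (repc 'l' K3t H3 (repc 'm' K2t H2 (repc 'h' K1t H1 (t)))) K6t le_rfl (ball_ne_of_all (by decide)) (by simpa only [H4] using h1)
        have h3 : K6t <+: repc 'm' K2t H2 (repc 'h' K1t H1 (t)) :=
          prefix_repc 'l' K3t 'क' H3t (repc 'm' K2t H2 (repc 'h' K1t H1 (t))).length (repc 'm' K2t H2 (repc 'h' K1t H1 (t))) K6t le_rfl (ball_ne_of_all (by decide)) (by simpa only [H3] using h2)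
        have h4 : K6t <+: repc 'h' K1t H1 (t) :=
          prefix_repc 'm' K2t 'म' H2t (repc 'h' K1t H1 (t)).length (repc 'h' K1t H1 (t)) K6t le_rfl (ball_ne_of_all (by decide)) (by simpa only [H2] using h3)
        have h5 : K6t <+: t :=
          prefix_repc 'h' K1t 'उ' H1t (t).length (t) K6t le_rfl (ball_ne_of_all (by decide)) (by simpa only [H1] using h4)
        exact p6 (by simp only [K6]; exact List.cons_prefix_cons.mpr ⟨rfl, h5⟩)
      rw [repc_cons_neg 'h' K1t H1 _ _ q1,
          repc_cons_neg 'm' K2t H2 _ _ q2,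
          repc_cons_neg 'l' K3t H3 _ _ q3,
          repc_cons_neg 's' K4t H4 _ _ q4,
          repc_cons_neg 'r' K5t H5 _ _ q5,
          repc_cons_neg 's' K6t H6 _ _ q6, hI]
      have hm : bMatch bTable (c :: t) = none := by
        rw [bTableEq]
        simp only [bMatch, List.isPrefixOf_iff_prefix]
        rw [if_neg p1, if_neg p2, if_neg p3, if_neg p4, if_neg p5, if_neg p6]
      rw [bScan, hm]

theorem translate_explanation_spec : Claim_equal_translate_explanation := by
  intro e tl _
  unfold Spec_translate_explanation translate_explanation translate_explanation_alt
  by_cases h : tl = "hi"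
  · simp only [h, if_pos, ne_eq, not_true_eq_false, if_false]
    have hT : (aTranslations.foldl (fun translated p => PySem.Str.replace translated p.1 p.2) e).toList = bScan e.toList := by
      simp only [aTranslations, List.foldl_cons, List.foldl_nil]
      simp only [PySem.Str.toList_replace]
      simp only [rep1, rep2, rep3, rep4, rep5, rep6]
      exact seq_eq_scan e.toList.length e.toList le_rfl
    calc aTranslations.foldl (fun translated p => PySem.Str.replace translated p.1 p.2) e
        = String.ofList (aTranslations.foldl (fun translated p => PySem.Str.replace translated p.1 p.2) e).toList := String.ofList_toList.symm
      _ = String.ofList (bScan e.toList) := by rw [hT]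
  · simp [h]
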